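-- pv_equiv track=rewrite | github.com/Linux-cpp-lisp/opt_einsum_fx | opt_einsum_fx/tracing.py | _count_unique_unhashable
-- ===== SOURCE A (Python) =====
-- def _count_unique_unhashable(iterable):
--     """Count 'unique' objects in `iterable` by `==`, even if unhashable
--
--     Assumes that `==` is transitive.
--     """
--     count: int = 0
--     seen = []
--     for process in iterable:
--         if not any(e == process for e in seen):
--             # not previously seen
--             count += 1
--             seen.append(process)
--     return count
-- ===== SOURCE B (Python) =====
-- def _count_unique_unhashable(iterable):
--     """Count 'unique' objects in `iterable` by `==`, even if unhashable
--
--     Assumes that `==` is transitive.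
--     """
--     items = list(iterable)
--     return sum(1 for i, x in enumerate(items) if all(x != y for y in items[:i]))
-- ===== Notes on version B (the rewrite author's own statement) =====
-- stated objective: alternative
-- what changed: Replaces the growing deduplicated `seen` representative list plus a count accumulator with a single pass that counts first occurrences directly: element at index i is counted iff no equal element occurs in items[:i].
import Mathlib
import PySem

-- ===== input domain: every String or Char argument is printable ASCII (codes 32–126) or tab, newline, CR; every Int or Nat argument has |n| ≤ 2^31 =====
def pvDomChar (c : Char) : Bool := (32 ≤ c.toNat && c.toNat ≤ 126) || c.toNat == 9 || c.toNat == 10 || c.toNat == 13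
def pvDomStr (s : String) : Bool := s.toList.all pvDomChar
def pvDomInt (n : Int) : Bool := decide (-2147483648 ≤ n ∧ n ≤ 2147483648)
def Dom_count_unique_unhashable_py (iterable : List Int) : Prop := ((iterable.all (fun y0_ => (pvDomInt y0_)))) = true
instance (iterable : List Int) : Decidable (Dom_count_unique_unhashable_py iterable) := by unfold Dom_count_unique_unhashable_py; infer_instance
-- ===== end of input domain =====

-- B counts first occurrences by scanning each element's index prefix instead of
-- maintaining A's deduplicated `seen` representative list; same O(n^2) cost (objective: alternative).


-- ===== PORT A =====
-- state (count, seen); each element is appended to `seen` iff no previous representative equals it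
def count_unique_unhashable_py (iterable : List Int) : Int :=
  (iterable.foldl
    (fun (st : Int × List Int) process =>
      if st.2.any (fun e => e == process) then st
      else (st.1 + 1, st.2 ++ [process]))
    (0, [])).1

-- ===== PORT B =====
-- sum(1 for i, x in enumerate(items) if all(x != y for y in items[:i]));
-- items[:i] with the nonnegative enumerate index i is exactly `take i`
def count_unique_unhashable_py_alt (iterable : List Int) : Int :=
  let items := iterable
  (PySem.List.enumerate items 0).foldl
    (fun acc p =>
      if (items.take p.1.toNat).all (fun y => decide (p.2 ≠ y)) then acc + 1 else acc)
    0

-- ===== PRECONDITION & SPEC =====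
def Spec_count_unique_unhashable_py (iterable : List Int) (out : Int) : Prop := out = count_unique_unhashable_py_alt iterable
instance (iterable : List Int) (out : Int) : Decidable (Spec_count_unique_unhashable_py iterable out) := by unfold Spec_count_unique_unhashable_py; infer_instance

-- ===== CLAIM (what is proved, stated in full; the proofs are below) =====
def Claim_equal_count_unique_unhashable_py : Prop := ∀ (iterable : List Int), Dom_count_unique_unhashable_py iterable → Spec_count_unique_unhashable_py iterable (count_unique_unhashable_py iterable)

-- ===== LEMMAS AND PROOFS =====

-- common specification: number of elements of the remaining list whose equality class
-- has no representative in the already-processed prefix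
def gcnt : List Int → List Int → Int
  | [], _ => 0
  | x :: t, pre => (if x ∈ pre then 0 else 1) + gcnt t (pre ++ [x])

theorem gcnt_congr : ∀ (t s1 s2 : List Int), (∀ z, z ∈ s1 ↔ z ∈ s2) → gcnt t s1 = gcnt t s2 := by
  intro t
  induction t with
  | nil => intro s1 s2 _; rfl
  | cons x t ih =>
    intro s1 s2 h
    simp only [gcnt, h x]
    congr 1
    exact ih _ _ (fun z => by simp [h z])

theorem lemA : ∀ (t : List Int) (c : Int) (s : List Int),
    (t.foldl
      (fun (st : Int × List Int) process =>
        if st.2.any (fun e => e == process) then st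
        else (st.1 + 1, st.2 ++ [process]))
      (c, s)).1 = c + gcnt t s := by
  intro t
  induction t with
  | nil => intro c s; simp [gcnt]
  | cons x t ih =>
    intro c s
    simp only [List.foldl_cons, gcnt]
    by_cases hx : x ∈ s
    · have : s.any (fun e => e == x) = true := by
        simp only [List.any_eq_true, beq_iff_eq]; exact ⟨x, hx, rfl⟩
      simp only [this, hx, if_pos]
      rw [ih, gcnt_congr t s (s ++ [x]) (fun z => by simp; intro hz; subst hz; exact hx)]
      omega
    · have : s.any (fun e => e == x) = false := by
        simp only [List.any_eq_false, beq_iff_eq]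
        intro e he h; exact hx (h ▸ he)
      simp only [this, if_neg hx, Bool.false_eq_true, if_false]
      rw [ih]
      omega

theorem lemB : ∀ (l pre : List Int) (acc : Int),
    ((PySem.List.enumerate l (pre.length : Int)).foldl
      (fun acc p =>
        if ((pre ++ l).take p.1.toNat).all (fun y => decide (p.2 ≠ y)) then acc + 1 else acc)
      acc) = acc + gcnt l pre := by
  intro l
  induction l with
  | nil => intro pre acc; simp [PySem.List.enumerate_nil, gcnt]
  | cons x t ih =>
    intro pre acc
    rw [PySem.List.enumerate_cons]
    simp only [List.foldl_cons]
    have htake : ((pre ++ x :: t).take ((pre.length : Int)).toNat) = pre := by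
      simp
    rw [htake]
    have hfold :
        (PySem.List.enumerate t ((pre.length : Int) + 1)).foldl
          (fun acc p =>
            if ((pre ++ x :: t).take p.1.toNat).all (fun y => decide (p.2 ≠ y)) then acc + 1 else acc)
          (if pre.all (fun y => decide (x ≠ y)) then acc + 1 else acc)
        = (if pre.all (fun y => decide (x ≠ y)) then acc + 1 else acc) + gcnt t (pre ++ [x]) := by
      have hlen : ((pre.length : Int) + 1) = (((pre ++ [x]).length : Int)) := by simp
      have hlist : pre ++ x :: t = (pre ++ [x]) ++ t := by simp
      rw [hlen, hlist]
      exact ih (pre ++ [x]) _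
    rw [hfold]
    simp only [gcnt]
    by_cases hx : x ∈ pre
    · have : pre.all (fun y => decide (x ≠ y)) = false := by
        simp only [List.all_eq_false]
        exact ⟨x, hx, by simp⟩
      rw [this]
      simp only [hx, if_pos, Bool.false_eq_true, if_false]
      omega
    · have : pre.all (fun y => decide (x ≠ y)) = true := by
        simp only [List.all_eq_true, decide_eq_true_eq]
        intro y hy h; exact hx (h ▸ hy)
      rw [this]
      simp only [hx, if_true, if_false]
      omega

-- ===== VERDICT (by name: the statement is the Claim_ definition above) =====
theorem count_unique_unhashable_py_spec : Claim_equal_count_unique_unhashable_py := by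
  intro iterable _
  unfold Spec_count_unique_unhashable_py count_unique_unhashable_py count_unique_unhashable_py_alt
  rw [lemA]
  show 0 + gcnt iterable [] =
    (PySem.List.enumerate iterable 0).foldl
      (fun acc p =>
        if (iterable.take p.1.toNat).all (fun y => decide (p.2 ≠ y)) then acc + 1 else acc) 0
  have h := lemB iterable [] 0
  simp only [List.length_nil, Nat.cast_zero, List.nil_append] at h
  exact h.symm
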